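-- pv_equiv track=rewrite | github.com/miliar/Code_Jam_Webscraper | solutions_python/Problem_155/2875.py | howmanyinvites
-- ===== SOURCE A (Python) =====
-- def howmanyinvites(guests):
--     numinvited,numstanding = 0,0
--     for shyness,numpeople in enumerate(guests):
--         if numstanding >= shyness:
--             numstanding += numpeople
--         else:
--             numinvited += shyness-numstanding
--             numstanding += shyness-numstanding
--             numstanding += numpeople
--     return numinvited
-- ===== SOURCE B (Python) =====
-- def howmanyinvites(guests):
--     # Stage 1: build the list of per-index deficits (index minus people before it).
--     deficits, before = [], 0
--     for idx, x in enumerate(guests):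
--         deficits.append(idx - before)
--         before += x
--     # Stage 2: scan that list for its largest element (at least 0).
--     best = 0
--     for d in deficits:
--         if d > best:
--             best = d
--     return best
-- ===== Notes on version B (the rewrite author's own statement) =====
-- stated objective: alternative
-- what changed: B materialises the whole list of per-index deficits (index minus prefix sum of people before it) in a first pass and then takes its maximum with 0 in a separate second pass, instead of A's single greedy loop that mutates an invited/standing accumulator pair and resets the standing count whenever it falls short.
import Mathlib
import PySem

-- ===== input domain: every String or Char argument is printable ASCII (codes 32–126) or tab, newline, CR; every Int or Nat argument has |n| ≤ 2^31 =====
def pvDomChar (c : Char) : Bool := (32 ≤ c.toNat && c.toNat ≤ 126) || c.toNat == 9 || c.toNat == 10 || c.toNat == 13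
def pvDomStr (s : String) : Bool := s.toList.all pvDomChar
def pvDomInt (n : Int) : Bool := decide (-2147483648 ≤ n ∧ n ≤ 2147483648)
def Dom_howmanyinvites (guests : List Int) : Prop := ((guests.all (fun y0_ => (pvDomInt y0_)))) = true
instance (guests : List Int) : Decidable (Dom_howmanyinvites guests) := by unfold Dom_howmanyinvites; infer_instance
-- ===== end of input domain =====

-- B materialises the per-index deficit list in a first pass and takes its max with 0 in a second pass, replacing A's greedy invited/standing accumulator (alternative decomposition, same cost).


-- ===== PORT A =====
-- step of A's loop body: state = (numinvited, numstanding)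
def howmanyinvitesStep (s : Int × Int) (p : Int × Int) : Int × Int :=
  if s.2 ≥ p.1 then (s.1, s.2 + p.2)
  else (s.1 + (p.1 - s.2), (s.2 + (p.1 - s.2)) + p.2)

def howmanyinvites (guests : List Int) : Int :=
  ((PySem.List.enumerate guests).foldl howmanyinvitesStep (0, 0)).1

-- ===== PORT B =====
-- stage 1 of B: state = (deficits, before); append this index's deficit, then add its count
def howmanyinvitesAltBuild (s : List Int × Int) (p : Int × Int) : List Int × Int :=
  (s.1 ++ [p.1 - s.2], s.2 + p.2)

-- stage 2 of B: scan the deficit list for its largest element, starting from 0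
def howmanyinvites_alt (guests : List Int) : Int :=
  (((PySem.List.enumerate guests).foldl howmanyinvitesAltBuild ([], 0)).1).foldl
    (fun best d => if d > best then d else best) 0

-- ===== PRECONDITION & SPEC =====
def Spec_howmanyinvites (guests : List Int) (out : Int) : Prop := out = howmanyinvites_alt guests
instance (guests : List Int) (out : Int) : Decidable (Spec_howmanyinvites guests out) := by unfold Spec_howmanyinvites; infer_instance

-- ===== CLAIM (what is proved, stated in full; the proofs are below) =====
def Claim_equal_howmanyinvites : Prop := ∀ (guests : List Int), Dom_howmanyinvites guests → Spec_howmanyinvites guests (howmanyinvites guests)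

-- ===== LEMMAS AND PROOFS =====

-- proof-side characterisation of B's stage-1 list, built front-to-back
def pvDeficits : List Int → Int → Int → List Int
  | [], _, _ => []
  | x :: t, idx, before => (idx - before) :: pvDeficits t (idx + 1) (before + x)

-- B's stage-1 fold produces acc followed by the deficit list
theorem howmanyinvites_build_eq (l : List Int) :
    ∀ (i : Int) (acc : List Int) (before : Int),
    ((PySem.List.enumerate l i).foldl howmanyinvitesAltBuild (acc, before)).1 =
      acc ++ pvDeficits l i before := by
  induction l with
  | nil => intro i acc before; simp [PySem.List.enumerate_nil, pvDeficits]
  | cons x xs ih =>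
    intro i acc before
    simp only [PySem.List.enumerate_cons, List.foldl_cons, howmanyinvitesAltBuild, pvDeficits]
    rw [ih]
    simp

-- Coupling invariant: with A's standing = before + invited, A's fold over the
-- enumerated guests computes exactly the running max (seeded with invited) of
-- the deficit list that B builds.
theorem howmanyinvites_fold_eq (l : List Int) :
    ∀ (i inv stand before : Int), stand = before + inv →
    ((PySem.List.enumerate l i).foldl howmanyinvitesStep (inv, stand)).1 =
      (pvDeficits l i before).foldl (fun best d => if d > best then d else best) inv := by
  induction l with
  | nil => intro i inv stand before _; simp [PySem.List.enumerate_nil, pvDeficits]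
  | cons x xs ih =>
    intro i inv stand before h
    simp only [PySem.List.enumerate_cons, pvDeficits, List.foldl_cons]
    by_cases hc : stand ≥ i
    · have hs : howmanyinvitesStep (inv, stand) (i, x) = (inv, stand + x) := by
        simp [howmanyinvitesStep, hc]
      have hb : (if i - before > inv then i - before else inv) = inv := by
        rw [if_neg (by omega)]
      rw [hs, hb]
      exact ih _ _ _ _ (by omega)
    · have hs : howmanyinvitesStep (inv, stand) (i, x) =
          (inv + (i - stand), (stand + (i - stand)) + x) := by
        simp only [howmanyinvitesStep]; rw [if_neg hc]
      have hb : (if i - before > inv then i - before else inv) = i - before := by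
        rw [if_pos (by omega)]
      rw [hs, hb]
      have := ih (i + 1) (inv + (i - stand)) ((stand + (i - stand)) + x) (before + x) (by omega)
      rw [this]
      congr 1
      omega

-- ===== VERDICT (by name: the statement is the Claim_ definition above) =====
theorem howmanyinvites_spec : Claim_equal_howmanyinvites := by
  intro guests _
  unfold Spec_howmanyinvites howmanyinvites howmanyinvites_alt
  rw [howmanyinvites_build_eq guests 0 [] 0, List.nil_append]
  exact howmanyinvites_fold_eq guests 0 0 0 0 (by ring)
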